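-- pv_equiv track=rewrite | github.com/WarrenElliot/Python-Projects | polynomial.py | for_poly
-- ===== SOURCE A (Python) =====
-- def for_poly(poly, n, x):
--     result = 0
--     for i in range(n):
--         Sum = poly[i]
--         for j in range(n-i-1):
--             Sum = Sum * x
--         result = result + Sum
--     return str(result)
-- ===== SOURCE B (Python) =====
-- def for_poly(poly, n, x):
--     result = 0
--     for c in poly[:max(n, 0)]:
--         result = result * x + c
--     return str(result)
-- ===== Notes on version B (the rewrite author's own statement) =====
-- stated objective: faster
-- what changed: Replaces the doubly-nested power-by-repeated-multiplication loop with a single Horner pass (result = result*x + coeff) over the first n coefficients.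
import Mathlib
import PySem

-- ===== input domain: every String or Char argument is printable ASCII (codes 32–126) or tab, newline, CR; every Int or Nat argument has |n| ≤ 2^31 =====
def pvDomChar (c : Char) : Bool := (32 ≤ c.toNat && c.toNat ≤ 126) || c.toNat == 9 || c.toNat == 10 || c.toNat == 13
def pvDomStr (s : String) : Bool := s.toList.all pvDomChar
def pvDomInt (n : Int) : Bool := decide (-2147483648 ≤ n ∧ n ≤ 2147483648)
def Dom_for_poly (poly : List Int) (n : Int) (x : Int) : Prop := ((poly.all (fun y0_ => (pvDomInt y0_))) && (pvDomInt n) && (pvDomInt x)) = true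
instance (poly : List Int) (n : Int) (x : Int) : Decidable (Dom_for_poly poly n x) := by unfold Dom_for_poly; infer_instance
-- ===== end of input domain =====

-- B replaces A's doubly-nested repeated-multiplication loop with a single Horner pass.

-- ===== PORT A =====
-- literal port: outer loop over range(n); inner loop multiplies Sum by x (n-i-1) times
def for_poly (poly : List Int) (n : Int) (x : Int) : String :=
  let result : Int :=
    (PySem.List.pyRange 0 n 1).foldl (fun result i =>
      let Sum := PySem.List.pyGetD poly i 0
      let Sum := (PySem.List.pyRange 0 (n - i - 1) 1).foldl (fun Sum _ => Sum * x) Sum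
      result + Sum) 0
  PySem.Int.toStr result

-- ===== PORT B =====
-- literal port of Source B: Horner fold over poly[:max(n,0)]
def for_poly_alt (poly : List Int) (n : Int) (x : Int) : String :=
  PySem.Int.toStr
    ((PySem.List.slice poly none (some (max n 0))).foldl (fun result c => result * x + c) 0)

-- ===== PRECONDITION & SPEC =====
-- Pre_ excludes n > len(poly), where A raises IndexError (poly[i] out of range).
def Pre_for_poly (poly : List Int) (n : Int) (x : Int) : Prop := n ≤ (poly.length : Int)
instance (poly : List Int) (n : Int) (x : Int) : Decidable (Pre_for_poly poly n x) := by unfold Pre_for_poly; infer_instance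
def pvWitness_for_poly : List Int × Int × Int := ([2, -1, 3], 3, 5)

def Spec_for_poly (poly : List Int) (n : Int) (x : Int) (out : String) : Prop := out = for_poly_alt poly n x
instance (poly : List Int) (n : Int) (x : Int) (out : String) : Decidable (Spec_for_poly poly n x out) := by unfold Spec_for_poly; infer_instance

-- ===== CLAIM (what is proved, stated in full; the proofs are below) =====
def Claim_equal_for_poly : Prop := ∀ (poly : List Int) (n : Int) (x : Int), Dom_for_poly poly n x → Pre_for_poly poly n x → Spec_for_poly poly n x (for_poly poly n x)

-- ===== LEMMAS AND PROOFS =====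

-- the inner loop of A multiplies the state by x once per element
theorem foldl_mul_const (x : Int) : ∀ (l : List Int) (S : Int),
    l.foldl (fun S _ => S * x) S = S * x ^ l.length := by
  intro l
  induction l with
  | nil => intro S; simp
  | cons c l ih => intro S; simp [List.foldl_cons, ih, pow_succ]; ring

-- the value of the Horner fold started from an arbitrary accumulator
theorem horner_foldl (x : Int) : ∀ (l : List Int) (r : Int),
    l.foldl (fun result c => result * x + c) r
      = r * x ^ l.length + l.foldl (fun result c => result * x + c) 0 := by
  intro l
  induction l with
  | nil => intro r; simp
  | cons c l ih =>
      intro r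
      simp only [List.foldl_cons, List.length_cons]
      rw [ih (r * x + c), ih (0 * x + c)]
      ring

-- the Horner fold equals the power-sum A computes, coefficient-list form
theorem horner_eq_sum (x : Int) : ∀ (l : List Int),
    l.foldl (fun result c => result * x + c) 0
      = ((List.range l.length).map (fun k => l.getD k 0 * x ^ (l.length - 1 - k))).sum := by
  intro l
  induction l with
  | nil => simp
  | cons c l ih =>
      simp only [List.foldl_cons, List.length_cons, zero_mul, zero_add]
      rw [horner_foldl x l c, ih, List.range_succ_eq_map, List.map_cons, List.map_map, List.sum_cons]
      have h2 : List.map ((fun k => (c :: l).getD k 0 * x ^ (l.length + 1 - 1 - k)) ∘ Nat.succ) (List.range l.length)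
            = List.map (fun k => l.getD k 0 * x ^ (l.length - 1 - k)) (List.range l.length) := by
        apply List.map_congr_left; intro k hk; simp only [List.mem_range] at hk
        simp only [Function.comp_apply, List.getD_cons_succ]
        congr 2; omega
      rw [h2]
      simp

theorem for_poly_spec' (poly : List Int) (n : Int) (x : Int)
    (hpre : n ≤ (poly.length : Int)) : for_poly poly n x = for_poly_alt poly n x := by
  unfold for_poly for_poly_alt
  dsimp only
  congr 1
  by_cases hn : n ≤ 0
  · rw [PySem.List.pyRange_one_eq_nil hn, PySem.List.slice_to poly (by omega : (0:Int) ≤ max n 0)]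
    have : (max n 0).toNat = 0 := by omega
    simp [this]
  · -- 0 < n ≤ len poly; let m be n as a Nat
    set m : Nat := n.toNat with hm
    have hnm : (m : Int) = n := by omega
    have hmlen : m ≤ poly.length := by omega
    rw [PySem.List.slice_to poly (by omega : (0:Int) ≤ max n 0)]
    have hmax : (max n 0).toNat = m := by omega
    rw [hmax, horner_eq_sum, PySem.List.pyRange_one 0 n, List.foldl_map]
    have hlen : (poly.take m).length = m := by simp [hmlen]
    have hsub : (n - 0).toNat = m := by omega
    rw [hsub, hlen]
    rw [PySem.List.foldl_congr_mem (List.range m) _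
        (fun (result : Int) (k : Nat) => result + poly.getD k 0 * x ^ (m - 1 - k)) 0 ?_]
    · rw [PySem.List.foldl_add, zero_add]
      apply congrArg
      apply List.map_congr_left
      intro k hk
      simp only [List.mem_range] at hk
      congr 1
      rw [List.getD_eq_getElem?_getD, List.getD_eq_getElem?_getD, List.getElem?_take, if_pos hk]
    · intro acc k hk
      simp only [List.mem_range] at hk
      simp only [foldl_mul_const x, PySem.List.length_pyRange_one, zero_add,
        PySem.List.pyGetD_natCast]
      congr 3
      omega

-- ===== VERDICT (by name: the statement is the Claim_ definition above) =====
theorem for_poly_spec : Claim_equal_for_poly := by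
  intro poly n x _ hpre
  exact for_poly_spec' poly n x hpre
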